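-- pv_equiv track=rewrite | github.com/devjerry0/sane-contractions | contractions/loaders.py | build_apostrophe_variants
-- ===== SOURCE A (Python) =====
-- from itertools import product
--
-- def build_apostrophe_variants(contractions: dict[str, str], safety_keys: frozenset[str]) -> dict[str, str]:
--     apostrophe_variants = ["", "'"]
--     variants_dict = {}
--
--     for contraction, expansion in contractions.items():
--         if "'" not in contraction:
--             continue
--
--         if contraction.lower() in safety_keys:
--             continue
--
--         tokens = contraction.split("'")
--         combinations = get_combinations(tokens, apostrophe_variants)
--
--         for combination in combinations:
--             variants_dict[combination] = expansion
--
--     return variants_dict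
--
-- def get_combinations(tokens, joiners):
--     token_options = [[token] for token in tokens]
--     interspersed_options = intersperse(token_options, joiners)
--     return ["".join(combination) for combination in product(*interspersed_options)]
--
-- def intersperse(items, separator):
--     result = [separator] * (len(items) * 2 - 1)
--     result[0::2] = items
--     return result
-- ===== SOURCE B (Python) =====
-- def build_apostrophe_variants(contractions: dict[str, str], safety_keys: frozenset[str]) -> dict[str, str]:
--     variants_dict = {}
--     for contraction, expansion in contractions.items():
--         if "'" not in contraction:
--             continue
--         if contraction.lower() in safety_keys:
--             continue
--         # scan the characters right-to-left, maintaining the variants of the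
--         # current suffix: an apostrophe is optional, any other char mandatory
--         variants = [""]
--         for ch in reversed(contraction):
--             if ch == "'":
--                 variants = variants + ["'" + v for v in variants]
--             else:
--                 variants = [ch + v for v in variants]
--         for variant in variants:
--             variants_dict[variant] = expansion
--     return variants_dict
-- ===== Notes on version B (the rewrite author's own statement) =====
-- stated objective: alternative
-- what changed: B never splits the contraction into tokens or enumerates separator tuples: it scans the raw characters right-to-left, maintaining the variant strings of the current suffix (an apostrophe character is optional, any other character is mandatory), so the get_combinations/intersperse/itertools.product pipeline disappears.
import Mathlib
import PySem

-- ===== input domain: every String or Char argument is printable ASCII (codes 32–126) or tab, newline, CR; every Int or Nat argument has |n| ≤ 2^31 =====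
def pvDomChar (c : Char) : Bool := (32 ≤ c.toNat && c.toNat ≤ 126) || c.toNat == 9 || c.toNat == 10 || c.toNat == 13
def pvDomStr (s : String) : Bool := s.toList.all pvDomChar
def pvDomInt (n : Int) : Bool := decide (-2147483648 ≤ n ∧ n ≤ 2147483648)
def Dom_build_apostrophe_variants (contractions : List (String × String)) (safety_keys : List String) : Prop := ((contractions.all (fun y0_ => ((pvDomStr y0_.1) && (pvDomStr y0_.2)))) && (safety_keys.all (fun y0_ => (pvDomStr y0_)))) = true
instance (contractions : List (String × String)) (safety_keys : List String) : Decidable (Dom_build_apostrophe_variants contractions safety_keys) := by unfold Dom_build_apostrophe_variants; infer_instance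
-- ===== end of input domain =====

-- B drops A's split/intersperse/product pipeline entirely: it scans the contraction's
-- characters right-to-left, maintaining the variants of the current suffix (objective: alternative).

-- ===== PORT A =====
-- intersperse(items, separator): result = [separator]*(2n-1); result[0::2] = items.
-- Ported by hand as the alternating list it builds (exact: the slice assignment puts
-- items at even positions and leaves separator at odd positions; for items = [] the
-- python produces [] as well, since [separator]*(-1) = []).
def pvIntersperse (items : List (List String)) (sep : List String) : List (List String) :=
  match items with
  | [] => []
  | [x] => [x]
  | x :: rest => x :: sep :: pvIntersperse rest sep

-- itertools.product(*pools), ported by hand: lexicographic order, last pool varying fastest.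
def pvProduct (pools : List (List String)) : List (List String) :=
  match pools with
  | [] => [[]]
  | l :: rest => l.flatMap (fun x => (pvProduct rest).map (fun c => x :: c))

def pvGetCombinations (tokens : List String) (joiners : List String) : List String :=
  let token_options := tokens.map (fun t => [t])
  let interspersed_options := pvIntersperse token_options joiners
  (pvProduct interspersed_options).map (fun combination => PySem.Str.join "" combination)

def build_apostrophe_variants (contractions : List (String × String)) (safety_keys : List String) : List (String × String) :=
  let apostrophe_variants := ["", "'"]
  (contractions.foldl (fun (variants_dict : PySem.Dict String String) ce =>
      if !(PySem.Str.isIn "'" ce.1) then variants_dict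
      else if safety_keys.contains (PySem.Str.lower ce.1) then variants_dict
      else
        -- contraction.split("'"): sep = "'" ≠ "", so split? is always `some`
        let tokens := (PySem.Str.split? ce.1 "'").getD []
        let combinations := pvGetCombinations tokens apostrophe_variants
        combinations.foldl (fun vd combination => vd.insert combination ce.2) variants_dict)
    PySem.Dict.empty).items

-- ===== PORT B =====
-- variants = [""]; for ch in reversed(contraction): variants = variants + ["'"+v …] if ch == "'" else [ch+v …]
-- (the reversed-character loop is the foldr over the char list: last character first)
def pvSuffixVariants (s : String) : List String :=
  s.toList.foldr (fun ch variants =>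
    if ch = '\'' then variants ++ variants.map (fun v => "'" ++ v)
    else variants.map (fun v => ch.toString ++ v)) [""]

def build_apostrophe_variants_alt (contractions : List (String × String)) (safety_keys : List String) : List (String × String) :=
  (contractions.foldl (fun (variants_dict : PySem.Dict String String) ce =>
      if !(PySem.Str.isIn "'" ce.1) then variants_dict
      else if safety_keys.contains (PySem.Str.lower ce.1) then variants_dict
      else
        (pvSuffixVariants ce.1).foldl (fun vd variant => vd.insert variant ce.2) variants_dict)
    PySem.Dict.empty).items

-- ===== PRECONDITION & SPEC =====
def Spec_build_apostrophe_variants (contractions : List (String × String)) (safety_keys : List String) (out : List (String × String)) : Prop := out = build_apostrophe_variants_alt contractions safety_keys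
instance (contractions : List (String × String)) (safety_keys : List String) (out : List (String × String)) : Decidable (Spec_build_apostrophe_variants contractions safety_keys out) := by unfold Spec_build_apostrophe_variants; infer_instance

-- ===== CLAIM (what is proved, stated in full; the proofs are below) =====
def Claim_equal_build_apostrophe_variants : Prop := ∀ (contractions : List (String × String)) (safety_keys : List String), Dom_build_apostrophe_variants contractions safety_keys → Spec_build_apostrophe_variants contractions safety_keys (build_apostrophe_variants contractions safety_keys)

-- ===== LEMMAS AND PROOFS =====

-- the "joiner·token" suffix combinations, shared characterisation of A's product
def pvG (rest : List String) : List String :=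
  match rest with
  | [] => [""]
  | u :: us => (pvG us).map (fun w => u ++ w) ++ (pvG us).map (fun w => "'" ++ (u ++ w))

theorem pvJoin_nil : PySem.Str.join "" ([] : List String) = "" := by
  apply String.toList_inj.mp
  simp [PySem.Str.toList_join, PySem.Chars.join, List.intercalate]

theorem pvJoin_cons (x : String) (l : List String) :
    PySem.Str.join "" (x :: l) = x ++ PySem.Str.join "" l := by
  apply String.toList_inj.mp
  simp [PySem.Str.toList_join, PySem.Chars.join, List.intercalate]
  cases l <;> simp

theorem pvProdJoin_cons (l : List (List String)) (pool : List String) :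
    (pvProduct (pool :: l)).map (fun c => PySem.Str.join "" c)
      = pool.flatMap (fun x => ((pvProduct l).map (fun c => PySem.Str.join "" c)).map (fun w => x ++ w)) := by
  simp [pvProduct, List.map_flatMap, List.map_map, Function.comp_def, pvJoin_cons]

theorem pvIspJoin (tokens : List String) :
    (pvProduct (pvIntersperse (tokens.map (fun t => [t])) ["", "'"])).map (fun c => PySem.Str.join "" c)
      = match tokens with
        | [] => [""]
        | t :: rest => (pvG rest).map (fun w => t ++ w) := by
  induction tokens with
  | nil => simp [pvIntersperse, pvProduct, pvJoin_nil]
  | cons t rest ih =>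
    cases rest with
    | nil => simp [pvIntersperse, pvProduct, pvG, pvJoin_cons, pvJoin_nil]
    | cons u us =>
      dsimp only
      have h1 : pvIntersperse ((t :: u :: us).map (fun t => [t])) ["", "'"]
          = [t] :: ["", "'"] :: pvIntersperse ((u :: us).map (fun t => [t])) ["", "'"] := rfl
      rw [h1, pvProdJoin_cons, pvProdJoin_cons, ih]
      simp [pvG, List.map_map, Function.comp_def, List.map_append]

theorem pvCombosA (t : String) (rest : List String) :
    pvGetCombinations (t :: rest) ["", "'"] = (pvG rest).map (fun w => t ++ w) := by
  have := pvIspJoin (t :: rest)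
  simpa [pvGetCombinations] using this

-- functional characterisation of splitting a char list on '\'' : (first token, remaining tokens)
def pvSp (l : List Char) : List Char × List (List Char) :=
  match l with
  | [] => ([], [])
  | c :: l' =>
      let p := pvSp l'
      if c = '\'' then ([], p.1 :: p.2) else (c :: p.1, p.2)

theorem pvGo_spec (l : List Char) : ∀ (fuel : Nat) (cur : List Char) (acc : List (List Char)),
    l.length ≤ fuel →
    PySem.Chars.splitOn.go ['\''] fuel l cur acc
      = acc.reverse ++ (cur.reverse ++ (pvSp l).1) :: (pvSp l).2 := by
  induction l with
  | nil =>
    intro fuel cur acc _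
    cases fuel <;> simp [PySem.Chars.splitOn.go, pvSp]
  | cons c rest ih =>
    intro fuel cur acc hle
    cases fuel with
    | zero => simp at hle
    | succ f =>
      rw [PySem.Chars.splitOn.go.eq_def]
      dsimp only
      by_cases hc : c = '\''
      · subst hc
        rw [if_pos (by simp [List.isPrefixOf])]
        simp only [List.length_cons] at hle
        rw [show List.drop (['\''] : List Char).length ('\'' :: rest) = rest by simp]
        rw [ih f [] (cur.reverse :: acc) (by omega)]
        simp [pvSp]
      · rw [if_neg (by simp [List.isPrefixOf]; exact fun h => hc h.symm)]
        rw [ih f (c :: cur) acc (by simpa using Nat.le_of_succ_le_succ hle)]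
        simp [pvSp, hc]

theorem pvSplit_eq (s : String) :
    (PySem.Str.split? s "'").getD []
      = String.ofList (pvSp s.toList).1 :: (pvSp s.toList).2.map String.ofList := by
  simp only [PySem.Str.split?, PySem.Chars.split?, PySem.Chars.splitOn]
  rw [show ("'" : String).toList = ['\''] from rfl]
  rw [pvGo_spec s.toList (s.toList.length + 1) [] [] (by omega)]
  simp

theorem pvOfList_cons (c : Char) (l : List Char) :
    String.ofList (c :: l) = c.toString ++ String.ofList l := by
  apply String.toList_inj.mp
  simp

-- B's suffix scan equals A's combinations of the split tokens
theorem pvSuffix_eq_combos (s : String) :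
    pvSuffixVariants s
      = (pvG ((pvSp s.toList).2.map String.ofList)).map
          (fun w => String.ofList (pvSp s.toList).1 ++ w) := by
  suffices h : ∀ L : List Char,
      L.foldr (fun ch variants =>
          if ch = '\'' then variants ++ variants.map (fun v => "'" ++ v)
          else variants.map (fun v => ch.toString ++ v)) [""]
        = (pvG ((pvSp L).2.map String.ofList)).map (fun w => String.ofList (pvSp L).1 ++ w) by
    unfold pvSuffixVariants; exact h s.toList
  intro L
  induction L with
  | nil => simp [pvSp, pvG]
  | cons c rest ih =>
    simp only [List.foldr_cons, ih]
    by_cases hc : c = '\''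
    · subst hc
      simp [pvSp, pvG, List.map_map, Function.comp_def]
    · simp [pvSp, hc, List.map_map, Function.comp_def, pvOfList_cons, String.append_assoc]

theorem pvStep_eq (safety_keys : List String) (d : PySem.Dict String String) (ce : String × String) :
    (if !(PySem.Str.isIn "'" ce.1) then d
     else if safety_keys.contains (PySem.Str.lower ce.1) then d
     else
       (pvGetCombinations ((PySem.Str.split? ce.1 "'").getD []) ["", "'"]).foldl
         (fun vd combination => vd.insert combination ce.2) d)
      = (if !(PySem.Str.isIn "'" ce.1) then d
         else if safety_keys.contains (PySem.Str.lower ce.1) then d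
         else
           (pvSuffixVariants ce.1).foldl (fun vd variant => vd.insert variant ce.2) d) := by
  have hcombos : pvGetCombinations ((PySem.Str.split? ce.1 "'").getD []) ["", "'"]
      = pvSuffixVariants ce.1 := by
    rw [pvSplit_eq, pvCombosA, pvSuffix_eq_combos]
  rw [hcombos]

theorem pvFold_eq (safety_keys : List String) (l : List (String × String)) :
    ∀ d : PySem.Dict String String,
      l.foldl (fun variants_dict ce =>
          if !(PySem.Str.isIn "'" ce.1) then variants_dict
          else if safety_keys.contains (PySem.Str.lower ce.1) then variants_dict
          else
            (pvGetCombinations ((PySem.Str.split? ce.1 "'").getD []) ["", "'"]).foldl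
              (fun vd combination => vd.insert combination ce.2) variants_dict) d
        = l.foldl (fun variants_dict ce =>
            if !(PySem.Str.isIn "'" ce.1) then variants_dict
            else if safety_keys.contains (PySem.Str.lower ce.1) then variants_dict
            else
              (pvSuffixVariants ce.1).foldl
                (fun vd variant => vd.insert variant ce.2) variants_dict) d := by
  induction l with
  | nil => intro d; rfl
  | cons ce rest ih =>
    intro d
    simp only [List.foldl_cons]
    rw [pvStep_eq]
    exact ih _

-- ===== VERDICT (by name: the statement is the Claim_ definition above) =====
theorem build_apostrophe_variants_spec : Claim_equal_build_apostrophe_variants := by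
  unfold Claim_equal_build_apostrophe_variants
  intro contractions safety_keys _
  unfold Spec_build_apostrophe_variants
  simp only [build_apostrophe_variants, build_apostrophe_variants_alt]
  exact congrArg PySem.Dict.items (pvFold_eq safety_keys contractions PySem.Dict.empty)
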